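-- pv_equiv track=rewrite | github.com/sveee/advent-of-code | advent_of_code/2024/python/23.py | part1
-- ===== SOURCE A (Python) =====
-- from collections import defaultdict
--
-- def part1(text):
--     graph = defaultdict(set)
--     for line in text.splitlines():
--         left, right = line.split('-')
--         graph[left].add(right)
--         graph[right].add(left)
--
--     nodes = sorted(graph)
--     cliques_3 = set()
--     for node_a in nodes:
--         if not node_a.startswith('t'):
--             continue
--
--         for node_b in graph[node_a]:
--             for node_c in graph[node_b]:
--                 if node_c != node_a and node_a in graph[node_c]:
--                     cliques_3.add(tuple(sorted([node_a, node_b, node_c])))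
--     return len(cliques_3)
-- ===== SOURCE B (Python) =====
-- def part1(text):
--     adj = {}
--     for line in text.splitlines():
--         left, right = line.split('-')
--         adj.setdefault(left, set()).add(right)
--         adj.setdefault(right, set()).add(left)
--
--     count = 0
--     for u in adj:
--         for v in adj[u]:
--             if u < v:
--                 for w in adj[u] & adj[v]:
--                     if v < w and (u.startswith('t') or v.startswith('t') or w.startswith('t')):
--                         count += 1
--     return count
-- ===== Notes on version B (the rewrite author's own statement) =====
-- stated objective: alternative
-- what changed: Replaces A's dedup-set of sorted triples built by a two-hop neighbours-of-neighbours walk from t-nodes with a direct ordered-triple counter: enumerate u < v < w via set intersection of the two neighbourhoods and increment a counter when some member starts with 't', so no triangle set is materialised at all.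
-- outside the precondition, e.g. on part1('t-x\nx-x'): A returns 1, B returns 0; on part1('v-v'): A returns 0, B returns 0; on part1('tx'): A raises ValueError, B raises ValueError
import Mathlib
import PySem

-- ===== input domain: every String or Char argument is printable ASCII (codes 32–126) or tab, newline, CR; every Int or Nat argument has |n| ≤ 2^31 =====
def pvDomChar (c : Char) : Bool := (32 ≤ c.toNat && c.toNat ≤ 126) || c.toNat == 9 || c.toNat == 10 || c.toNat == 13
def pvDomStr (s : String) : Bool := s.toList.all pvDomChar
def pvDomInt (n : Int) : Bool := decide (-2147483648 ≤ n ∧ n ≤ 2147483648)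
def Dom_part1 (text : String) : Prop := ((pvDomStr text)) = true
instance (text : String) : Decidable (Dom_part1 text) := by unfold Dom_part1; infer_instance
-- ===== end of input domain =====

-- B replaces A's dedup-set of sorted triples (built by a two-hop neighbours-of-neighbours
-- walk from each t-node) with a direct counter over ordered triples u < v < w found by
-- intersecting the neighbourhoods of u and v — no triangle set is materialised (objective:
-- alternative, a genuinely different algorithm of similar cost).

-- ===== PORT A =====
-- tuple(sorted([a, b, c]))
def pvSort3 (a b c : String) : String × String × String :=
  match PySem.List.sorted [a, b, c] (fun x => x) false with
  | [x, y, z] => (x, y, z)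
  | _ => ("", "", "")   -- unreachable: sorted of a 3-list has 3 elements

-- A's graph-building loop: defaultdict(set), both directions added
def pvBuildGraph (text : String) : PySem.Dict String (PySem.Set String) :=
  (PySem.Str.splitlines text).foldl (fun g line =>
    match PySem.Str.split? line "-" with
    | some [l, r] =>
        (g.modify l PySem.Set.empty (fun s => PySem.Set.add s r)).modify r PySem.Set.empty
          (fun s => PySem.Set.add s l)
    | _ => g) PySem.Dict.empty   -- `_` = lines on which Python's unpacking raises; excluded by Pre_

-- inner two loops of A: for node_b in graph[node_a]: for node_c in graph[node_b]: …
def pvAInner (graph : PySem.Dict String (PySem.Set String)) (a : String)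
    (acc : PySem.Set (String × String × String)) : PySem.Set (String × String × String) :=
  (graph.getD a PySem.Set.empty).foldl (fun acc b =>
    (graph.getD b PySem.Set.empty).foldl (fun acc c =>
      if (c != a && PySem.Set.contains (graph.getD c PySem.Set.empty) a) then
        PySem.Set.add acc (pvSort3 a b c)
      else acc) acc) acc

def part1 (text : String) : Int :=
  let graph := pvBuildGraph text
  let nodes := PySem.List.sorted graph.keys (fun x => x) false
  let cliques3 := nodes.foldl (fun acc a =>
    if PySem.Str.startswith a "t" then pvAInner graph a acc else acc) PySem.Set.empty
  PySem.Set.len cliques3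

-- ===== PORT B =====
-- B's graph-building loop: plain dict, adj.setdefault(x, set()).add(y) for both directions
def pvBuildAdj (text : String) : PySem.Dict String (PySem.Set String) :=
  (PySem.Str.splitlines text).foldl (fun adj line =>
    match PySem.Str.split? line "-" with
    | some [left, right] =>
        let adj := (adj.setdefault left PySem.Set.empty).modify left PySem.Set.empty
          (fun s => PySem.Set.add s right)
        (adj.setdefault right PySem.Set.empty).modify right PySem.Set.empty
          (fun s => PySem.Set.add s left)
    | _ => adj) PySem.Dict.empty   -- `_` = lines on which Python's unpacking raises; excluded by Pre_

-- for u in adj: for v in adj[u]: if u < v: for w in adj[u] & adj[v]: if v < w and t-test: count += 1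
def part1_alt (text : String) : Int :=
  let adj := pvBuildAdj text
  adj.keys.foldl (fun count u =>
    (adj.getD u PySem.Set.empty).foldl (fun count v =>
      if u < v then
        (PySem.Set.inter (adj.getD u PySem.Set.empty) (adj.getD v PySem.Set.empty)).foldl
          (fun count w =>
            if v < w ∧ (PySem.Str.startswith u "t" || PySem.Str.startswith v "t" ||
                PySem.Str.startswith w "t") = true then count + 1
            else count) count
      else count) count) 0

-- ===== PRECONDITION & SPEC =====
def pvLineOK (line : String) : Bool :=
  match PySem.Str.split? line "-" with
  | some [l, r] => l != r
  | _ => false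

-- Pre_ excludes inputs with a line that does not split at the dash into exactly two parts (A
-- raises ValueError there) and inputs with a self-loop line naming the same node on both sides,
-- on which A counts degenerate repeated-node triples: neither A's nor B's count there is a
-- triangle count anyone would specify.
def Pre_part1 (text : String) : Prop :=
  ∀ line ∈ PySem.Str.splitlines text, pvLineOK line = true
instance (text : String) : Decidable (Pre_part1 text) := by unfold Pre_part1; infer_instance

def pvWitness_part1 : String := "ta-b\nb-c\nc-ta\nta-c"

def Spec_part1 (text : String) (out : Int) : Prop := out = part1_alt text
instance (text : String) (out : Int) : Decidable (Spec_part1 text out) := by unfold Spec_part1; infer_instance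

-- ===== CLAIM (what is proved, stated in full; the proofs are below) =====
def Claim_equal_part1 : Prop := ∀ (text : String), Dom_part1 text → Pre_part1 text → Spec_part1 text (part1 text)

-- ===== LEMMAS AND PROOFS =====

-- B's setdefault(k, set()) followed by an in-place add is A's modify with default
theorem pvSdMod (d : PySem.Dict String (PySem.Set String)) (l : String)
    (f : PySem.Set String → PySem.Set String) :
    (d.setdefault l PySem.Set.empty).modify l PySem.Set.empty f = d.modify l PySem.Set.empty f := by
  by_cases hc : d.contains l = true
  · rw [PySem.Dict.setdefault_of_contains (h := hc)]
  · rw [PySem.Dict.setdefault_of_not_contains (h := by simpa using hc)]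
    have hk : ∀ p ∈ d.items, p.1 ≠ l := by
      intro p hp he
      apply hc
      rw [PySem.Dict.contains_iff_mem_keys]
      show l ∈ d.items.map (·.1)
      exact List.mem_map.mpr ⟨p, hp, he⟩
    have hany : (d.items.any fun p => p.1 == l) = false := by
      rw [List.any_eq_false]; intro p hp; simpa using hk p hp
    have hfind : List.find? (fun p => p.1 == l) d.items = none := by
      rw [List.find?_eq_none]; intro p hp; simpa using hk p hp
    unfold PySem.Dict.modify PySem.Dict.insert
    simp [PySem.Dict.contains, PySem.Dict.getD_eq_get?_getD, PySem.Dict.get?, hany,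
      List.find?_append, hfind, List.map_append]
    rw [List.map_congr_left (fun p hp => if_neg (by simpa using hk p hp))]
    simp

-- the two builds produce the same dict
theorem pvBuildAdj_eq (text : String) : pvBuildAdj text = pvBuildGraph text := by
  unfold pvBuildAdj pvBuildGraph
  apply PySem.List.foldl_congr_mem
  intro adj line _
  rcases PySem.Str.split? line "-" with _ | (_ | ⟨l, _ | ⟨r, _ | _⟩⟩) <;>
    simp only [pvSdMod]

-- membership in a set-accumulating fold, given a membership description of one step
theorem pvMemFoldl {α β : Type} (x : α) (h : List α → β → List α) (Q : β → Prop)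
    (hx : ∀ s y, x ∈ h s y ↔ x ∈ s ∨ Q y) (l : List β) (s : List α) :
    x ∈ l.foldl h s ↔ x ∈ s ∨ ∃ y ∈ l, Q y := by
  induction l generalizing s with
  | nil => simp
  | cons y t ih =>
    rw [List.foldl_cons, ih, hx]
    simp only [List.mem_cons]
    constructor
    · rintro ((hs | hq) | ⟨z, hz, hq⟩)
      · exact Or.inl hs
      · exact Or.inr ⟨y, Or.inl rfl, hq⟩
      · exact Or.inr ⟨z, Or.inr hz, hq⟩
    · rintro (hs | ⟨z, (rfl | hz), hq⟩)
      · exact Or.inl (Or.inl hs)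
      · exact Or.inl (Or.inr hq)
      · exact Or.inr ⟨z, hz, hq⟩

theorem pvNodupFoldl {α β : Type} (h : List α → β → List α)
    (hstep : ∀ s y, s.Nodup → (h s y).Nodup) (l : List β) (s : List α) (hs : s.Nodup) :
    (l.foldl h s).Nodup := by
  induction l generalizing s with
  | nil => exact hs
  | cons y t ih => exact ih _ (hstep _ _ hs)

theorem pvLineOK_spec (line : String) (h : pvLineOK line = true) :
    ∃ l r, PySem.Str.split? line "-" = some [l, r] ∧ l ≠ r := by
  unfold pvLineOK at h
  rcases hs : PySem.Str.split? line "-" with _ | parts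
  · rw [hs] at h; cases h
  · rcases parts with _ | ⟨l, _ | ⟨r, _ | _⟩⟩ <;> rw [hs] at h <;> try cases h
    exact ⟨l, r, rfl, by simpa using h⟩

-- the graph invariant: nodup keys and values, symmetric irreflexive adjacency, keys cover nodes
def pvInv (g : PySem.Dict String (PySem.Set String)) : Prop :=
  g.keys.Nodup ∧
  (∀ k, (g.getD k PySem.Set.empty).Nodup) ∧
  (∀ x y, y ∈ g.getD x PySem.Set.empty ↔ x ∈ g.getD y PySem.Set.empty) ∧
  (∀ x, x ∉ g.getD x PySem.Set.empty) ∧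
  (∀ x y, y ∈ g.getD x PySem.Set.empty → x ∈ g.keys)

theorem pvInv_step (g : PySem.Dict String (PySem.Set String)) (l r : String) (hlr : l ≠ r)
    (h : pvInv g) :
    pvInv ((g.modify l PySem.Set.empty (fun s => PySem.Set.add s r)).modify r PySem.Set.empty
      (fun s => PySem.Set.add s l)) := by
  obtain ⟨h0, h1, h2, h3, h4⟩ := h
  have hG : ∀ k, ((g.modify l PySem.Set.empty (fun s => PySem.Set.add s r)).modify r
      PySem.Set.empty (fun s => PySem.Set.add s l)).getD k PySem.Set.empty =
      if k = r then PySem.Set.add (g.getD r PySem.Set.empty) l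
      else if k = l then PySem.Set.add (g.getD l PySem.Set.empty) r
      else g.getD k PySem.Set.empty := by
    intro k
    by_cases hkr : k = r
    · subst hkr
      rw [PySem.Dict.getD_modify_self, PySem.Dict.getD_modify_of_ne _ _ _ (Ne.symm hlr)]
      simp
    · rw [PySem.Dict.getD_modify_of_ne _ _ _ hkr]
      by_cases hkl : k = l
      · subst hkl; rw [PySem.Dict.getD_modify_self]; simp [hkr]
      · rw [PySem.Dict.getD_modify_of_ne _ _ _ hkl]; simp [hkr, hkl]
  have hK : ∀ k, k ∈ ((g.modify l PySem.Set.empty (fun s => PySem.Set.add s r)).modify r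
      PySem.Set.empty (fun s => PySem.Set.add s l)).keys ↔ k = r ∨ k = l ∨ k ∈ g.keys := by
    intro k
    rw [PySem.Dict.keys_modify, PySem.Dict.mem_keys_insert, PySem.Dict.keys_modify,
      PySem.Dict.mem_keys_insert]
  refine ⟨?_, ?_, ?_, ?_, ?_⟩
  · rw [PySem.Dict.keys_modify]
    apply PySem.Dict.nodup_keys_insert
    rw [PySem.Dict.keys_modify]
    exact PySem.Dict.nodup_keys_insert _ _ _ h0
  · intro k; rw [hG]
    split_ifs <;> first
      | exact PySem.Set.nodup_add _ _ (h1 _)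
      | exact h1 _
  · intro x y
    rw [hG, hG]
    by_cases hxr : x = r <;> by_cases hxl : x = l <;>
      by_cases hyr : y = r <;> by_cases hyl : y = l <;>
      simp_all [PySem.Set.mem_add]
  · intro x
    rw [hG]
    split_ifs with hxr hxl
    · subst hxr; simp only [PySem.Set.mem_add]
      rintro (h | h)
      · exact h3 x h
      · exact hlr h.symm
    · subst hxl; simp only [PySem.Set.mem_add]
      rintro (h | h)
      · exact h3 x h
      · exact hlr h
    · exact h3 x
  · intro x y
    rw [hG, hK]
    split_ifs with hxr hxl
    · intro _; exact Or.inl hxr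
    · intro _; exact Or.inr (Or.inl hxl)
    · intro hy; exact Or.inr (Or.inr (h4 x y hy))

theorem pvInv_empty : pvInv (PySem.Dict.empty : PySem.Dict String (PySem.Set String)) := by
  refine ⟨by simp [PySem.Dict.keys_empty], ?_, ?_, ?_, ?_⟩ <;> intro x <;>
    simp [PySem.Dict.getD_empty, PySem.Set.empty]

theorem pvInv_build (text : String) (hpre : Pre_part1 text) : pvInv (pvBuildGraph text) := by
  unfold pvBuildGraph
  have : ∀ (lines : List String), (∀ line ∈ lines, pvLineOK line = true) →
      ∀ g, pvInv g → pvInv (lines.foldl (fun g line =>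
        match PySem.Str.split? line "-" with
        | some [l, r] =>
            (g.modify l PySem.Set.empty (fun s => PySem.Set.add s r)).modify r PySem.Set.empty
              (fun s => PySem.Set.add s l)
        | _ => g) g) := by
    intro lines
    induction lines with
    | nil => intro _ g hg; exact hg
    | cons line t ih =>
      intro hOK g hg
      obtain ⟨l, r, hs, hlr⟩ := pvLineOK_spec line (hOK line (List.mem_cons_self ..))
      rw [List.foldl_cons, hs]
      exact ih (fun x hx => hOK x (List.mem_cons_of_mem _ hx)) _ (pvInv_step g l r hlr hg)
  exact this _ hpre _ pvInv_empty

-- membership step: adding under a Bool guard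
theorem pvMemAddIf {α : Type} [BEq α] [LawfulBEq α] (s : PySem.Set α) (v x : α) (cond : Bool) :
    (x ∈ if cond then PySem.Set.add s v else s) ↔ x ∈ s ∨ (cond = true ∧ x = v) := by
  cases cond
  · simp
  · simp [PySem.Set.mem_add]

-- membership in A's inner double loop
theorem pvMem_AInner (g : PySem.Dict String (PySem.Set String)) (a : String)
    (x : String × String × String) (acc : PySem.Set (String × String × String)) :
    x ∈ pvAInner g a acc ↔ x ∈ acc ∨
      ∃ b ∈ g.getD a PySem.Set.empty, ∃ c ∈ g.getD b PySem.Set.empty,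
        c ≠ a ∧ a ∈ g.getD c PySem.Set.empty ∧ x = pvSort3 a b c := by
  unfold pvAInner
  rw [pvMemFoldl x _ (fun b => ∃ c ∈ g.getD b PySem.Set.empty,
      (c ≠ a ∧ a ∈ g.getD c PySem.Set.empty) ∧ x = pvSort3 a b c) ?_ _ acc]
  · constructor
    · rintro (hs | ⟨b, hb, c, hc, ⟨h1, h2⟩, h3⟩)
      · exact Or.inl hs
      · exact Or.inr ⟨b, hb, c, hc, h1, h2, h3⟩
    · rintro (hs | ⟨b, hb, c, hc, h1, h2, h3⟩)
      · exact Or.inl hs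
      · exact Or.inr ⟨b, hb, c, hc, ⟨h1, h2⟩, h3⟩
  · intro s b
    rw [pvMemFoldl x _ (fun c => (c ≠ a ∧ a ∈ g.getD c PySem.Set.empty) ∧ x = pvSort3 a b c)
      ?_ _ s]
    intro s' c
    rw [pvMemAddIf]
    simp only [Bool.and_eq_true, bne_iff_ne, PySem.Set.contains_iff]

-- membership in A's whole outer loop
theorem pvMem_outer_A (g : PySem.Dict String (PySem.Set String)) (nodes : List String)
    (x : String × String × String) :
    x ∈ nodes.foldl (fun acc a =>
        if PySem.Str.startswith a "t" then pvAInner g a acc else acc) PySem.Set.empty ↔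
      ∃ a ∈ nodes, PySem.Str.startswith a "t" = true ∧
        ∃ b ∈ g.getD a PySem.Set.empty, ∃ c ∈ g.getD b PySem.Set.empty,
          c ≠ a ∧ a ∈ g.getD c PySem.Set.empty ∧ x = pvSort3 a b c := by
  rw [pvMemFoldl x _ (fun a => PySem.Str.startswith a "t" = true ∧
      ∃ b ∈ g.getD a PySem.Set.empty, ∃ c ∈ g.getD b PySem.Set.empty,
        c ≠ a ∧ a ∈ g.getD c PySem.Set.empty ∧ x = pvSort3 a b c) ?_ _ _]
  · simp [PySem.Set.empty]
  · intro s a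
    split_ifs with ht
    · rw [pvMem_AInner]
      constructor
      · rintro (hs | h)
        · exact Or.inl hs
        · exact Or.inr ⟨ht, h⟩
      · rintro (hs | ⟨_, h⟩)
        · exact Or.inl hs
        · exact Or.inr h
    · constructor
      · intro hs; exact Or.inl hs
      · rintro (hs | ⟨hT, _⟩)
        · exact hs
        · exact absurd hT ht

-- A's accumulated set is Nodup
theorem pvNodup_AInner (g : PySem.Dict String (PySem.Set String)) (a : String)
    (acc : PySem.Set (String × String × String)) (h : acc.Nodup) : (pvAInner g a acc).Nodup := by
  unfold pvAInner
  refine pvNodupFoldl _ (fun s b hs => ?_) _ _ h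
  refine pvNodupFoldl _ (fun s' c hs' => ?_) _ _ hs
  split_ifs
  · exact PySem.Set.nodup_add _ _ hs'
  · exact hs'

theorem pvNodup_outer_A (g : PySem.Dict String (PySem.Set String)) (nodes : List String) :
    (nodes.foldl (fun acc a =>
      if PySem.Str.startswith a "t" then pvAInner g a acc else acc) PySem.Set.empty).Nodup := by
  refine pvNodupFoldl _ (fun s a hs => ?_) _ _ (by simp [PySem.Set.empty])
  split_ifs
  · exact pvNodup_AInner g a s hs
  · exact hs

-- pairwise on an explicit 3-list
theorem pvPw3 {α : Type} (R : α → α → Prop) (x y z : α) (hxy : R x y) (hxz : R x z)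
    (hyz : R y z) : List.Pairwise R [x, y, z] := by
  refine List.Pairwise.cons ?_ (List.Pairwise.cons ?_ (List.Pairwise.cons ?_ List.Pairwise.nil))
  · intro b hb
    rcases List.mem_cons.mp hb with rfl | hb
    · exact hxy
    rcases List.mem_cons.mp hb with rfl | hb
    · exact hxz
    · exact absurd hb (List.not_mem_nil)
  · intro b hb
    rcases List.mem_cons.mp hb with rfl | hb
    · exact hyz
    · exact absurd hb (List.not_mem_nil)
  · intro b hb
    exact absurd hb (List.not_mem_nil)

theorem pvPw3_elim {α : Type} (R : α → α → Prop) (x y z : α)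
    (h : List.Pairwise R [x, y, z]) : R x y ∧ R x z ∧ R y z := by
  rw [List.pairwise_cons] at h
  obtain ⟨h1, h2⟩ := h
  rw [List.pairwise_cons] at h2
  obtain ⟨h2a, _⟩ := h2
  exact ⟨h1 y (by simp), h1 z (by simp), h2a z (by simp)⟩

-- sorting a strictly sorted permutation of [a, b, c]
theorem pvSort3_eq (a b c p q r : String) (hperm : ([p, q, r] : List String).Perm [a, b, c])
    (hpq : p < q) (hqr : q < r) : pvSort3 a b c = (p, q, r) := by
  unfold pvSort3
  rw [PySem.List.sorted_eq_of_perm_of_pairwise_lt [a, b, c] [p, q, r] (fun x => x) hperm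
    (pvPw3 _ p q r hpq (lt_trans hpq hqr) hqr)]

-- decomposing pvSort3 of three distinct strings
theorem pvSort3_decomp (a b c : String) (hab : a ≠ b) (hac : a ≠ c) (hbc : b ≠ c) :
    ∃ p q r, p < q ∧ q < r ∧ ([p, q, r] : List String).Perm [a, b, c] ∧
      pvSort3 a b c = (p, q, r) := by
  have hperm := PySem.List.sorted_perm [a, b, c] (fun x : String => x) false
  have hpw := PySem.List.sorted_pairwise [a, b, c] (fun x : String => x)
  have hnd : (PySem.List.sorted [a, b, c] (fun x : String => x) false).Nodup :=
    hperm.nodup_iff.mpr (by simp [hab, hac, hbc])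
  have hlen := hperm.length_eq
  rcases hs : PySem.List.sorted [a, b, c] (fun x : String => x) false with
      _ | ⟨p, _ | ⟨q, _ | ⟨r, _ | t⟩⟩⟩ <;> rw [hs] at hlen hperm hpw hnd <;>
    try simp at hlen
  obtain ⟨hle1, _, hle2⟩ := pvPw3_elim _ p q r hpw
  simp only [List.nodup_cons, List.mem_cons, List.not_mem_nil, or_false, not_or] at hnd
  refine ⟨p, q, r, lt_of_le_of_ne hle1 hnd.1.1, lt_of_le_of_ne hle2 hnd.2.1, hperm, ?_⟩
  unfold pvSort3
  rw [hs]

-- the canonical description of a counted triangle: sorted components, mutually adjacent,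
-- at least one node starting with 't'
def pvGood (g : PySem.Dict String (PySem.Set String)) (x : String × String × String) : Prop :=
  x.1 < x.2.1 ∧ x.2.1 < x.2.2 ∧
  x.2.1 ∈ g.getD x.1 PySem.Set.empty ∧ x.2.2 ∈ g.getD x.1 PySem.Set.empty ∧
  x.2.2 ∈ g.getD x.2.1 PySem.Set.empty ∧
  (PySem.Str.startswith x.1 "t" || PySem.Str.startswith x.2.1 "t" ||
    PySem.Str.startswith x.2.2 "t") = true

-- A's set contains exactly the pvGood triples
theorem pvA_char (g : PySem.Dict String (PySem.Set String)) (hg : pvInv g)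
    (x : String × String × String) :
    x ∈ (PySem.List.sorted g.keys (fun x => x) false).foldl (fun acc a =>
        if PySem.Str.startswith a "t" then pvAInner g a acc else acc) PySem.Set.empty ↔
      pvGood g x := by
  obtain ⟨h0, h1, h2, h3, h4⟩ := hg
  have hnodes : ∀ a : String, a ∈ PySem.List.sorted g.keys (fun x => x) false ↔ a ∈ g.keys :=
    fun a => (PySem.List.sorted_perm g.keys (fun x => x) false).mem_iff
  rw [pvMem_outer_A]
  constructor
  · rintro ⟨a, _, ht, b, hb, c, hc, hca, hac, rfl⟩
    have hba : b ≠ a := fun he => h3 a (he ▸ hb)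
    have hcb : c ≠ b := fun he => h3 b (he ▸ hc)
    obtain ⟨p, q, r, hpq, hqr, hperm, heq⟩ :=
      pvSort3_decomp a b c (Ne.symm hba) (Ne.symm hca) (Ne.symm hcb)
    rw [heq]
    have hpw : List.Pairwise (fun u v => v ∈ g.getD u PySem.Set.empty ∧
        u ∈ g.getD v PySem.Set.empty) [p, q, r] := by
      rw [hperm.pairwise_iff (fun {u v} h => ⟨h.2, h.1⟩)]
      exact pvPw3 _ a b c ⟨hb, (h2 a b).mp hb⟩ ⟨(h2 c a).mp hac, hac⟩ ⟨hc, (h2 b c).mp hc⟩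
    obtain ⟨hPQ, hPR, hQR⟩ := pvPw3_elim _ p q r hpw
    have hat : a ∈ ([p, q, r] : List String) := hperm.mem_iff.mpr (by simp)
    refine ⟨hpq, hqr, hPQ.1, hPR.1, hQR.1, ?_⟩
    simp only [Bool.or_eq_true]
    rcases List.mem_cons.mp hat with rfl | hat
    · exact Or.inl (Or.inl ht)
    rcases List.mem_cons.mp hat with rfl | hat
    · exact Or.inl (Or.inr ht)
    rcases List.mem_cons.mp hat with rfl | hat
    · exact Or.inr ht
    · exact absurd hat (List.not_mem_nil)
  · obtain ⟨p, q, r⟩ := x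
    rintro ⟨hpq, hqr, hq, hr, hqr2, htB⟩
    simp only [Bool.or_eq_true] at htB
    have hpr : p < r := lt_trans hpq hqr
    rcases htB with (ht | ht) | ht
    · exact ⟨p, (hnodes p).mpr (h4 p q hq), ht, q, hq, r, hqr2, hpr.ne', (h2 p r).mp hr,
        (pvSort3_eq p q r p q r (List.Perm.refl _) hpq hqr).symm⟩
    · exact ⟨q, (hnodes q).mpr (h4 q p ((h2 p q).mp hq)), ht, p, (h2 p q).mp hq, r, hr,
        hqr.ne', (h2 q r).mp hqr2,
        (pvSort3_eq q p r p q r (List.Perm.swap q p [r]) hpq hqr).symm⟩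
    · exact ⟨r, (hnodes r).mpr (h4 r p ((h2 p r).mp hr)), ht, p, (h2 p r).mp hr, q, hq,
        hqr.ne, hqr2,
        (pvSort3_eq r p q p q r
          (((List.Perm.swap p r [q]).trans (List.Perm.cons p (List.Perm.swap q r []))).symm)
          hpq hqr).symm⟩

-- pvTriples: the list of triples B's loops count, written as a flatMap
def pvTriples (g : PySem.Dict String (PySem.Set String)) : List (String × String × String) :=
  g.keys.flatMap (fun u =>
    ((g.getD u PySem.Set.empty).filter (fun v => decide (u < v))).flatMap (fun v =>
      ((PySem.Set.inter (g.getD u PySem.Set.empty) (g.getD v PySem.Set.empty)).filter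
        (fun w => decide (v < w) && (PySem.Str.startswith u "t" || PySem.Str.startswith v "t" ||
          PySem.Str.startswith w "t"))).map (fun w => (u, v, w))))

theorem pvMem_triples (g : PySem.Dict String (PySem.Set String)) (hg : pvInv g)
    (x : String × String × String) : x ∈ pvTriples g ↔ pvGood g x := by
  obtain ⟨h0, h1, h2, h3, h4⟩ := hg
  obtain ⟨p, q, r⟩ := x
  simp only [pvTriples, List.mem_flatMap, List.mem_filter, List.mem_map,
    PySem.Set.mem_inter, pvGood, decide_eq_true_eq, Bool.and_eq_true]
  constructor
  · rintro ⟨u, hu, v, ⟨hv, huv⟩, w, ⟨⟨hw1, hw2⟩, hvw, htw⟩, he⟩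
    obtain ⟨rfl, rfl, rfl⟩ : u = p ∧ v = q ∧ w = r := by
      simpa [Prod.ext_iff] using he
    exact ⟨huv, hvw, hv, hw1, hw2, htw⟩
  · rintro ⟨hpq, hqr, hq, hr, hqr', ht⟩
    exact ⟨p, h4 p q hq, q, ⟨hq, hpq⟩, r, ⟨⟨hr, hqr'⟩, hqr, ht⟩, rfl⟩

theorem pvNodup_triples (g : PySem.Dict String (PySem.Set String)) (hg : pvInv g) :
    (pvTriples g).Nodup := by
  obtain ⟨h0, h1, _, _, _⟩ := hg
  unfold pvTriples
  rw [List.nodup_flatMap]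
  constructor
  · intro u _
    rw [List.nodup_flatMap]
    constructor
    · intro v _
      refine List.Nodup.map ?_ (List.Nodup.filter _ (PySem.Set.nodup_inter _ _ (h1 u)))
      intro w w' h
      simpa [Prod.ext_iff] using h
    · refine List.Pairwise.imp ?_ (List.Nodup.filter _ (h1 u))
      intro v v' hne t ht ht'
      simp only [List.mem_map] at ht ht'
      obtain ⟨w, _, rfl⟩ := ht
      obtain ⟨w', _, he⟩ := ht'
      exact hne ((Prod.ext_iff.mp (Prod.ext_iff.mp he).2).1).symm
  · refine List.Pairwise.imp ?_ h0
    intro u u' hne t ht ht'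
    simp only [List.mem_flatMap, List.mem_map] at ht ht'
    obtain ⟨v, _, w, _, rfl⟩ := ht
    obtain ⟨v', _, w', _, he⟩ := ht'
    exact hne ((Prod.ext_iff.mp he).1).symm

-- decide of a conjunction of a Prop and a Bool test
theorem pvDecAnd (P : Prop) [Decidable P] (b : Bool) :
    decide (P ∧ b = true) = (decide P && b) := by
  by_cases h : P <;> cases b <;> simp [h]

-- B's counting loops compute the length of pvTriples
theorem pvCount_eq (g : PySem.Dict String (PySem.Set String)) :
    g.keys.foldl (fun count u =>
      (g.getD u PySem.Set.empty).foldl (fun count v =>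
        if u < v then
          (PySem.Set.inter (g.getD u PySem.Set.empty) (g.getD v PySem.Set.empty)).foldl
            (fun count w =>
              if v < w ∧ (PySem.Str.startswith u "t" || PySem.Str.startswith v "t" ||
                  PySem.Str.startswith w "t") = true then count + 1
              else count) count
        else count) count) 0 = ((pvTriples g).length : Int) := by
  have hInner : ∀ (u v : String) (cnt : Int),
      (PySem.Set.inter (g.getD u PySem.Set.empty) (g.getD v PySem.Set.empty)).foldl
        (fun count w =>
          if v < w ∧ (PySem.Str.startswith u "t" || PySem.Str.startswith v "t" ||
              PySem.Str.startswith w "t") = true then count + 1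
          else count) cnt
      = cnt + (((PySem.Set.inter (g.getD u PySem.Set.empty) (g.getD v PySem.Set.empty)).filter
          (fun w => decide (v < w) && (PySem.Str.startswith u "t" ||
            PySem.Str.startswith v "t" || PySem.Str.startswith w "t"))).length : Int) := by
    intro u v cnt
    rw [PySem.List.foldl_ite_add_one (p := fun w => v < w ∧ (PySem.Str.startswith u "t" ||
      PySem.Str.startswith v "t" || PySem.Str.startswith w "t") = true)]
    rw [show (fun w => decide (v < w ∧ (PySem.Str.startswith u "t" ||
        PySem.Str.startswith v "t" || PySem.Str.startswith w "t") = true)) =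
      (fun w => decide (v < w) && (PySem.Str.startswith u "t" ||
        PySem.Str.startswith v "t" || PySem.Str.startswith w "t")) from
      funext (fun w => pvDecAnd _ _)]
    rw [List.countP_eq_length_filter]
  have hMid : ∀ (u : String) (cnt : Int),
      (g.getD u PySem.Set.empty).foldl (fun count v =>
        if u < v then
          (PySem.Set.inter (g.getD u PySem.Set.empty) (g.getD v PySem.Set.empty)).foldl
            (fun count w =>
              if v < w ∧ (PySem.Str.startswith u "t" || PySem.Str.startswith v "t" ||
                  PySem.Str.startswith w "t") = true then count + 1
              else count) count
        else count) cnt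
      = cnt + (((g.getD u PySem.Set.empty).filter (fun v => decide (u < v))).map (fun v =>
          (((PySem.Set.inter (g.getD u PySem.Set.empty) (g.getD v PySem.Set.empty)).filter
            (fun w => decide (v < w) && (PySem.Str.startswith u "t" ||
              PySem.Str.startswith v "t" ||
              PySem.Str.startswith w "t"))).length : Int))).sum := by
    intro u cnt
    rw [PySem.List.foldl_ite_eq_foldl_filter]
    rw [PySem.List.foldl_congr_mem _ _ (fun (count : Int) v =>
      count + (((PySem.Set.inter (g.getD u PySem.Set.empty)
        (g.getD v PySem.Set.empty)).filter
          (fun w => decide (v < w) && (PySem.Str.startswith u "t" ||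
            PySem.Str.startswith v "t" || PySem.Str.startswith w "t"))).length : Int))
      _ (fun count v _ => hInner u v count)]
    rw [PySem.List.foldl_add]
  rw [PySem.List.foldl_congr_mem _ _ (fun (count : Int) u =>
      count + (((g.getD u PySem.Set.empty).filter (fun v => decide (u < v))).map (fun v =>
        (((PySem.Set.inter (g.getD u PySem.Set.empty) (g.getD v PySem.Set.empty)).filter
          (fun w => decide (v < w) && (PySem.Str.startswith u "t" ||
            PySem.Str.startswith v "t" ||
            PySem.Str.startswith w "t"))).length : Int))).sum)
    _ (fun count u _ => hMid u count)]
  rw [PySem.List.foldl_add]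
  unfold pvTriples
  rw [List.length_flatMap]
  push_cast [List.length_flatMap, List.map_map, List.length_map, Function.comp_def]
  ring

-- ===== VERDICT (by name: the statement is the Claim_ definition above) =====
theorem part1_spec : Claim_equal_part1 := by
  intro text _ hpre
  unfold Spec_part1 part1 part1_alt
  rw [pvBuildAdj_eq]
  have hg := pvInv_build text hpre
  have hperm : ((PySem.List.sorted (pvBuildGraph text).keys (fun x => x) false).foldl
      (fun acc a => if PySem.Str.startswith a "t" then pvAInner (pvBuildGraph text) a acc
        else acc) PySem.Set.empty).Perm (pvTriples (pvBuildGraph text)) := by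
    refine (List.perm_ext_iff_of_nodup (pvNodup_outer_A _ _)
      (pvNodup_triples _ hg)).mpr ?_
    intro x
    rw [pvA_char _ hg x, pvMem_triples _ hg x]
  rw [pvCount_eq (pvBuildGraph text)]
  unfold PySem.Set.len
  show (↑(List.foldl (fun acc a => if PySem.Str.startswith a "t" = true
      then pvAInner (pvBuildGraph text) a acc else acc) PySem.Set.empty
      (PySem.List.sorted (pvBuildGraph text).keys fun x => x)).length : Int) = _
  exact_mod_cast congrArg (Nat.cast (R := Int)) hperm.length_eq
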